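-- pv_equiv track=rewrite | github.com/ml-utils/bert-syntax-it | src/linguistic_tests/bert_utils.py | count_split_words_in_sentence
-- ===== SOURCE A (Python) =====
-- def count_split_words_in_sentence(sentence_tokens):
--     split_words_in_sentence = (
--         0  # count how many ##tokens there are, subtract from total
--     )
--     token_of_previously_counted_split_word = False
--     for token in sentence_tokens:
--         if not token.startswith("##"):
--             token_of_previously_counted_split_word = False
--         elif not token_of_previously_counted_split_word:
--             split_words_in_sentence += 1
--             token_of_previously_counted_split_word = True
--     return split_words_in_sentence
-- ===== SOURCE B (Python) =====
-- def count_split_words_in_sentence(sentence_tokens):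
--     flags = "".join("#" if t.startswith("##") else "." for t in sentence_tokens)
--     return len([run for run in flags.split(".") if run])
-- ===== Notes on version B (the rewrite author's own statement) =====
-- stated objective: alternative
-- what changed: Instead of scanning tokens with a boolean state machine, B encodes each token as one character ('#' for ##-prefixed, '.' otherwise), joins them into a flag string, splits that string on '.', and counts the nonempty pieces — each nonempty piece is exactly one ##-run.
import Mathlib
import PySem

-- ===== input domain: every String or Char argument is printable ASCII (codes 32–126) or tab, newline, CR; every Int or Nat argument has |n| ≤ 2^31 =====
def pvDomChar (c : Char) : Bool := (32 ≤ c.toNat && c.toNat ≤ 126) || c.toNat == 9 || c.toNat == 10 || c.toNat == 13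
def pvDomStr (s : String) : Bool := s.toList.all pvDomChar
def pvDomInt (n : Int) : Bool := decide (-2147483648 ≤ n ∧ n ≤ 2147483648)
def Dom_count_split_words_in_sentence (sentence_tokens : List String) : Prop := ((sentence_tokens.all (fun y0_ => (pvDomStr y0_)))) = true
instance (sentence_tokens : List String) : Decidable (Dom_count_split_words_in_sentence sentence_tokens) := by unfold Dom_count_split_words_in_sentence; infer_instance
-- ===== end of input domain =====

-- B replaces A's boolean state-machine scan by a staged join/split: encode tokens as a flag
-- string, split on '.', count nonempty pieces (alternative decomposition, same cost).
-- ===== PORT A =====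
def count_split_words_in_sentence (sentence_tokens : List String) : Int :=
  (sentence_tokens.foldl
    (fun (st : Int × Bool) token =>
      if !(PySem.Str.startswith token "##") then (st.1, false)
      else if !st.2 then (st.1 + 1, true)
      else st)
    (0, false)).1

-- ===== PORT B =====
def count_split_words_in_sentence_alt (sentence_tokens : List String) : Int :=
  let flags := PySem.Str.join "" (sentence_tokens.map
    (fun t => if PySem.Str.startswith t "##" then "#" else "."))
  ((((PySem.Str.split? flags ".").getD []).filter (fun run => run ≠ "")).length : Int)

-- ===== PRECONDITION & SPEC =====
def Spec_count_split_words_in_sentence (sentence_tokens : List String) (out : Int) : Prop := out = count_split_words_in_sentence_alt sentence_tokens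
instance (sentence_tokens : List String) (out : Int) : Decidable (Spec_count_split_words_in_sentence sentence_tokens out) := by unfold Spec_count_split_words_in_sentence; infer_instance

-- ===== CLAIM (what is proved, stated in full; the proofs are below) =====
def Claim_equal_count_split_words_in_sentence : Prop := ∀ (sentence_tokens : List String), Dom_count_split_words_in_sentence sentence_tokens → Spec_count_split_words_in_sentence sentence_tokens (count_split_words_in_sentence sentence_tokens)

-- ===== LEMMAS AND PROOFS =====

-- run-count spec shared by both proofs: state machine over the flag characters
def pvRunCount : List Char → Bool → Int
  | [], _ => 0
  | c :: rest, flag =>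
    if c = '.' then pvRunCount rest false
    else if flag then pvRunCount rest true
    else 1 + pvRunCount rest true

-- A's fold computes pvRunCount of the flag characters
theorem pvA_fold (ts : List String) : ∀ (n : Int) (flag : Bool),
    (ts.foldl
      (fun (st : Int × Bool) token =>
        if !(PySem.Str.startswith token "##") then (st.1, false)
        else if !st.2 then (st.1 + 1, true)
        else st)
      (n, flag)).1
    = n + pvRunCount (ts.map (fun t => if PySem.Str.startswith t "##" then '#' else '.')) flag := by
  induction ts with
  | nil => intro n flag; simp [pvRunCount]
  | cons t rest ih =>
    intro n flag
    rw [List.map_cons, List.foldl_cons]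
    rcases hk : PySem.Str.startswith t "##" with _ | _
    · refine (ih n false).trans ?_
      cases flag <;> simp [pvRunCount]
    · rcases flag with _ | _
      · refine (ih (n + 1) true).trans ?_
        simp [pvRunCount]
        ring
      · refine (ih n true).trans ?_
        simp [pvRunCount]

-- splitOn.go on separator "." flushes pieces exactly at run boundaries
theorem pvGo_count : ∀ (fuel : Nat) (l cur : List Char) (acc : List (List Char)),
    l.length ≤ fuel →
    (((PySem.Chars.splitOn.go ['.'] fuel l cur acc).filter (fun r => r ≠ [])).length : Int)
    = ((acc.filter (fun r => r ≠ [])).length : Int)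
      + (if cur = [] then 0 else 1) + pvRunCount l (cur ≠ []) := by
  intro fuel
  induction fuel with
  | zero =>
    intro l cur acc h
    have hl : l = [] := List.length_eq_zero_iff.mp (Nat.le_zero.mp h)
    subst hl
    rcases cur with _ | ⟨c, cs⟩ <;>
      simp [PySem.Chars.splitOn.go, pvRunCount, List.filter_reverse]
  | succ fuel ih =>
    intro l cur acc h
    rcases l with _ | ⟨c, rest⟩
    · rcases cur with _ | ⟨c, cs⟩ <;>
        simp [PySem.Chars.splitOn.go, pvRunCount, List.filter_reverse]
    · have hr : rest.length ≤ fuel := by simpa using h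
      by_cases hc : c = '.'
      · subst hc
        have hpre : List.isPrefixOf ['.'] ('.' :: rest) = true := by
          simp [List.isPrefixOf]
        rw [PySem.Chars.splitOn.go]
        simp only [hpre, if_true, List.length_singleton, List.drop_succ_cons, List.drop_zero]
        rw [ih rest [] (cur.reverse :: acc) hr]
        rcases cur with _ | ⟨d, ds⟩ <;>
          simp [pvRunCount]
      · have hpre : List.isPrefixOf ['.'] (c :: rest) = false := by
          simp [List.isPrefixOf]
          intro h'; exact absurd h'.symm hc
        rw [PySem.Chars.splitOn.go]
        simp only [hpre, Bool.false_eq_true, if_false]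
        rw [ih rest (c :: cur) acc hr]
        rcases hcur : cur with _ | ⟨d, ds⟩ <;> rcases hf : decide (cur ≠ []) with _ | _ <;>
          simp_all [pvRunCount] ; try ring

theorem pvToList_flag (b : Bool) :
    (if b then ("#" : String) else ".").toList = [if b then '#' else '.'] := by
  cases b <;> decide

-- ===== VERDICT (by name: the statement is the Claim_ definition above) =====
theorem count_split_words_in_sentence_spec : Claim_equal_count_split_words_in_sentence := by
  intro ts _
  show _ = _
  unfold count_split_words_in_sentence count_split_words_in_sentence_alt
  rw [pvA_fold ts 0 false]
  set f : String → Char := fun t => if PySem.Str.startswith t "##" then '#' else '.' with hf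
  have hflags : (PySem.Str.join "" (ts.map
      (fun t => if PySem.Str.startswith t "##" then ("#" : String) else "."))).toList
      = ts.map f := by
    rw [PySem.Str.toList_join]
    have : (ts.map (fun t => if PySem.Str.startswith t "##" then ("#" : String) else ".")).map
        String.toList = (ts.map f).map (fun c => [c]) := by
      simp only [List.map_map]
      exact List.map_congr_left (fun t _ => pvToList_flag _)
    rw [this]
    simpa using PySem.Chars.join_nil_singletons (ts.map f)
  simp only [PySem.Str.split?]
  rw [hflags]
  have hsep : ("." : String).toList = ['.'] := by decide
  rw [hsep]
  rw [PySem.Chars.split?]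
  simp only [List.isEmpty_cons, Bool.false_eq_true, if_false, Option.map_some, Option.getD_some]
  have hfilter : ((PySem.Chars.splitOn (ts.map f) ['.']).map String.ofList).filter
      (fun run => run ≠ "")
      = ((PySem.Chars.splitOn (ts.map f) ['.']).filter (fun r => r ≠ [])).map String.ofList := by
    rw [List.filter_map]
    congr 1
    apply List.filter_congr
    intro cs _
    simp only [Function.comp_apply]
    by_cases h : cs = []
    · subst h; simp
    · simp only [ne_eq, decide_eq_decide]
      constructor
      · intro _; exact h
      · intro _ hcontra
        exact h (by simpa using congrArg String.toList hcontra)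
  rw [hfilter, List.length_map]
  have := pvGo_count ((ts.map f).length + 1) (ts.map f) [] [] (by omega)
  unfold PySem.Chars.splitOn
  simp only [List.filter_nil, List.length_nil] at this ⊢
  rw [this]
  simp
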